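-- pv_equiv track=rewrite | github.com/crsellinger/Python-Project | Final.py | confirmationCode
-- ===== SOURCE A (Python) =====
-- def confirmationCode(firstName):
--     str1 = "INFOTC1040"
--     str2 = firstName
--     code = ""
--
--     x = 0
--     y = 0
--     while (x < len(str1) or y < len(str2)):
--         #error check if x is still in bounds
--         if x in range(len(str1)):
--             code = code + str1[x]
--             x += 1
--
--         #error check if y is still in bounds
--         if y in range(len(str2)):
--             code = code + str2[y]
--             y += 1
--
--     return code
-- ===== SOURCE B (Python) =====
-- def confirmationCode(firstName):
--     # Lockstep pass over the zipped prefix, then append the remainder of the longer string.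
--     s1 = "INFOTC1040"
--     n = min(len(s1), len(firstName))
--     pairs = [a + b for a, b in zip(s1, firstName)]
--     return ''.join(pairs) + s1[n:] + firstName[n:]
-- ===== Notes on version B (the rewrite author's own statement) =====
-- stated objective: faster
-- what changed: Replaces the two-index while loop with quadratic repeated string concatenation by a single lockstep zip over the common prefix joined once, plus the leftover tail slices of both strings.
import Mathlib
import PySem

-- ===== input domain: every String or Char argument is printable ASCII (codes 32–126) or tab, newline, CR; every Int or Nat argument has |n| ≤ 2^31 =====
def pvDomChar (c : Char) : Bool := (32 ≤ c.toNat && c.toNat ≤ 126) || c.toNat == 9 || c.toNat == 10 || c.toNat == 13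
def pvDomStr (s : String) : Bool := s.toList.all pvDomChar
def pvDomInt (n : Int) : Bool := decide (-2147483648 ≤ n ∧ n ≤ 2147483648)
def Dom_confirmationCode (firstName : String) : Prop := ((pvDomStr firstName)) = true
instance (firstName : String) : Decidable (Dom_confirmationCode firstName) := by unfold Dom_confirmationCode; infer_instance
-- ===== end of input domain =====

-- B replaces A's two-index while loop by a zip over the common prefix plus the two tail slices (idiomatic).

-- ===== PORT A =====
-- the while loop of A: two indices x,y advanced while in bounds, appending to code
def pvLoopA (s1 s2 : List Char) (x y : Nat) (code : List Char) : List Char :=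
  if hxy : x < s1.length ∨ y < s2.length then
    if hx : x < s1.length then
      if hy : y < s2.length then
        pvLoopA s1 s2 (x+1) (y+1) (code ++ [s1.getD x ' '] ++ [s2.getD y ' '])
      else
        pvLoopA s1 s2 (x+1) y (code ++ [s1.getD x ' '])
    else
      pvLoopA s1 s2 x (y+1) (code ++ [s2.getD y ' '])
  else code
termination_by (s1.length - x) + (s2.length - y)
decreasing_by all_goals omega

def confirmationCode (firstName : String) : String :=
  String.mk (pvLoopA "INFOTC1040".toList firstName.toList 0 0 [])

-- ===== PORT B =====
def confirmationCode_alt (firstName : String) : String :=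
  let s1 := "INFOTC1040".toList
  let s2 := firstName.toList
  let n := min s1.length s2.length
  String.mk ((s1.zip s2).flatMap (fun p => [p.1, p.2]) ++ s1.drop n ++ s2.drop n)

-- ===== PRECONDITION & SPEC =====
def Spec_confirmationCode (firstName : String) (out : String) : Prop := out = confirmationCode_alt firstName
instance (firstName : String) (out : String) : Decidable (Spec_confirmationCode firstName out) := by unfold Spec_confirmationCode; infer_instance

-- ===== CLAIM (what is proved, stated in full; the proofs are below) =====
def Claim_equal_confirmationCode : Prop := ∀ (firstName : String), Dom_confirmationCode firstName → Spec_confirmationCode firstName (confirmationCode firstName)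

-- ===== LEMMAS AND PROOFS =====

-- the abstract interleaving both programs compute
def pvInterleave : List Char → List Char → List Char
  | [], l => l
  | a :: l1, [] => a :: l1
  | a :: l1, b :: l2 => a :: b :: pvInterleave l1 l2

theorem pvLoopA_eq (s1 s2 : List Char) (x y : Nat) (code : List Char) :
    pvLoopA s1 s2 x y code = code ++ pvInterleave (s1.drop x) (s2.drop y) := by
  fun_induction pvLoopA s1 s2 x y code with
  | case1 x y code hxy hx hy ih =>
      rw [ih, List.drop_eq_getElem_cons hx, List.drop_eq_getElem_cons hy,
        List.getD_eq_getElem s1 ' ' hx, List.getD_eq_getElem s2 ' ' hy]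
      simp [pvInterleave]
  | case2 x y code hxy hx hy ih =>
      have h2 : s2.drop y = [] := List.drop_eq_nil_of_le (by omega)
      rw [ih, h2, List.drop_eq_getElem_cons hx, List.getD_eq_getElem s1 ' ' hx]
      cases s1.drop (x+1) <;> simp [pvInterleave]
  | case3 x y code hxy hx ih =>
      have hy : y < s2.length := by omega
      have h1 : s1.drop x = [] := List.drop_eq_nil_of_le (by omega)
      rw [ih, h1, List.drop_eq_getElem_cons hy, List.getD_eq_getElem s2 ' ' hy]
      simp [pvInterleave]
  | case4 x y code hxy =>
      have h1 : s1.drop x = [] := List.drop_eq_nil_of_le (by omega)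
      have h2 : s2.drop y = [] := List.drop_eq_nil_of_le (by omega)
      rw [h1, h2]; simp [pvInterleave]

theorem pvInterleave_eq_zip (l1 l2 : List Char) :
    pvInterleave l1 l2 =
      (l1.zip l2).flatMap (fun p => [p.1, p.2]) ++
        l1.drop (min l1.length l2.length) ++ l2.drop (min l1.length l2.length) := by
  induction l1 generalizing l2 with
  | nil => simp [pvInterleave]
  | cons a l1 ih =>
      cases l2 with
      | nil => simp [pvInterleave]
      | cons b l2 => simp [pvInterleave, ih l2, Nat.succ_min_succ]

-- ===== VERDICT (by name: the statement is the Claim_ definition above) =====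
theorem confirmationCode_spec : Claim_equal_confirmationCode := by
  intro firstName _
  unfold Spec_confirmationCode confirmationCode confirmationCode_alt
  rw [pvLoopA_eq, pvInterleave_eq_zip]
  simp
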